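-- pv_equiv track=rewrite | github.com/pypi-data/pypi-mirror-397 | packages/aptbox/aptbox-0.1.1.tar.gz/aptbox-0.1.1/aptbox/apt/manager.py | _parse_package_info
-- ===== SOURCE A (Python) =====
-- def _parse_package_info(data):
--     """
--     解析软件包信息
--
--     Args:
--         data: apt-cache dumpavail的输出
--
--     Returns:
--         dict: 软件包信息字典，以包名为键
--     """
--     packages = {}
--     current_pkg = None
--
--     for line in data.splitlines():
--         if not line.strip():
--             current_pkg = None
--             continue
--
--         if line.startswith("Package: "):
--             pkg_name = line[9:].strip()
--             current_pkg = pkg_name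
--             packages[current_pkg] = {"name": current_pkg}
--         elif current_pkg and ": " in line:
--             key, value = line.split(": ", 1)
--             key = key.strip().lower()
--             value = value.strip()
--
--             if key == "version":
--                 packages[current_pkg]["version"] = value
--             elif key == "architecture":
--                 packages[current_pkg]["architecture"] = value
--             elif key == "description":
--                 packages[current_pkg]["description"] = value
--             elif key == "installed-size":
--                 # 将大小转换为字节数（KB -> bytes）
--                 try:
--                     size_kb = int(value)
--                     packages[current_pkg]["installed_size"] = size_kb * 1024  # KB to bytes
--                 except (ValueError, TypeError):
--                     packages[current_pkg]["installed_size"] = 0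
--
--     return packages
-- ===== SOURCE B (Python) =====
-- _FIELD_NAMES = {"version": "version", "architecture": "architecture",
--                 "description": "description"}
--
--
-- def _iter_blocks(lines):
--     """Yield maximal runs of non-blank lines."""
--     block = []
--     for line in lines:
--         if line.strip():
--             block.append(line)
--         elif block:
--             yield block
--             block = []
--     if block:
--         yield block
--
--
-- def _segments(block):
--     """Split a block at 'Package: ' headers; yield (name, body_lines).
--
--     Lines before the first header are dropped (no package is current there).
--     """
--     name = None
--     body = []
--     for line in block:
--         if line.startswith("Package: "):
--             if name is not None:
--                 yield name, body
--             name = line[9:].strip()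
--             body = []
--         elif name is not None:
--             body.append(line)
--     if name is not None:
--         yield name, body
--
--
-- def _fields(name, body):
--     """Build one package record from its header name and body lines."""
--     pkg = {"name": name}
--     if not name:
--         # a falsy name takes no fields (mirrors the truthiness test on the current package)
--         return pkg
--     for line in body:
--         if ": " not in line:
--             continue
--         key, value = line.split(": ", 1)
--         key = key.strip().lower()
--         value = value.strip()
--         if key in _FIELD_NAMES:
--             pkg[_FIELD_NAMES[key]] = value
--         elif key == "installed-size":
--             try:
--                 pkg["installed_size"] = int(value) * 1024
--             except (ValueError, TypeError):
--                 pkg["installed_size"] = 0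
--     return pkg
--
--
-- def _parse_package_info(data):
--     """Split into stanza blocks, split each block into package segments,
--     and build each package record independently."""
--     packages = {}
--     for block in _iter_blocks(data.splitlines()):
--         for name, body in _segments(block):
--             packages[name] = _fields(name, body)
--     return packages
-- ===== Notes on version B (the rewrite author's own statement) =====
-- stated objective: alternative
-- what changed: Replaces A's flat single-pass state machine over all lines with a staged decomposition: group lines into blank-line-separated blocks, split each block into per-package segments at 'Package: ' headers, and build each package record independently before inserting it.
import Mathlib
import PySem

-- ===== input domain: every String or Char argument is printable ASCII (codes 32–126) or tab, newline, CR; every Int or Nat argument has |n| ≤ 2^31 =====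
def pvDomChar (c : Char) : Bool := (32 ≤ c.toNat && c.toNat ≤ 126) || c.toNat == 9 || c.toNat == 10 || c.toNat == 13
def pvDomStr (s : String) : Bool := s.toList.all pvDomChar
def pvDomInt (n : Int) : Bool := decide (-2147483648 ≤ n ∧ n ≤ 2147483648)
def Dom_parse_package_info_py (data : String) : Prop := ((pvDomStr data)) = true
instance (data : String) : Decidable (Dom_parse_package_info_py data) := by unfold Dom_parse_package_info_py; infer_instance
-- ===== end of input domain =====

-- B replaces A's flat line-by-line state machine with a staged decomposition: split the input into
-- blank-line-separated blocks, split each block into per-package segments at "Package: " headers, and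
-- build each package record independently (return value only; Python's installed_size value is an int,
-- rendered here as its decimal string to fit the declared String value type — both ports render it alike).

-- ===== PORT A =====
-- field dispatch of A's elif chain (packages[current_pkg][...] = ...)
def pvSetFieldA (pkgs : PySem.Dict String (PySem.Dict String String)) (cur key value : String) :
    PySem.Dict String (PySem.Dict String String) :=
  if key == "version" then pkgs.modify cur PySem.Dict.empty (fun d => d.insert "version" value)
  else if key == "architecture" then pkgs.modify cur PySem.Dict.empty (fun d => d.insert "architecture" value)
  else if key == "description" then pkgs.modify cur PySem.Dict.empty (fun d => d.insert "description" value)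
  else if key == "installed-size" then
    match PySem.Int.ofStr? value with
    | some n => pkgs.modify cur PySem.Dict.empty (fun d => d.insert "installed_size" (PySem.Int.toStr (n * 1024)))
    | none => pkgs.modify cur PySem.Dict.empty (fun d => d.insert "installed_size" "0")
  else pkgs

-- one iteration of A's for-loop over (packages, current_pkg)
def pvStepA (s : PySem.Dict String (PySem.Dict String String) × Option String) (line : String) :
    PySem.Dict String (PySem.Dict String String) × Option String :=
  if PySem.Str.strip line = "" then (s.1, none)
  else if PySem.Str.startswith line "Package: " = true then
    let name := PySem.Str.strip (PySem.Str.slice line (some 9) none)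
    (s.1.insert name (PySem.Dict.ofList [("name", name)]), some name)
  else
    match s.2 with
    | none => s
    | some cur =>
      if (!(cur == "") && PySem.Str.isIn ": " line) = true then
        match PySem.Str.splitMax? line ": " 1 with
        | some (k :: v :: _) =>
            (pvSetFieldA s.1 cur (PySem.Str.lower (PySem.Str.strip k)) (PySem.Str.strip v), some cur)
        | _ => s          -- unreachable: ": " ∈ line gives at least two pieces
      else s

def parse_package_info_py (data : String) : List (String × List (String × String)) :=
  ((PySem.Str.splitlines data).foldl pvStepA (PySem.Dict.empty, none)).1.items.map
    (fun p => (p.1, p.2.items))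

-- ===== PORT B =====
-- the module-level _FIELD_NAMES dict literal
def pvFieldNames : PySem.Dict String String :=
  PySem.Dict.mk [("version", "version"), ("architecture", "architecture"), ("description", "description")]

-- body of _fields' for-loop: one field line into the local pkg dict
def pvFieldStep (pkg : PySem.Dict String String) (line : String) : PySem.Dict String String :=
  if PySem.Str.isIn ": " line = false then pkg
  else
    match PySem.Str.splitMax? line ": " 1 with
    | some (k :: v :: _) =>
      let key := PySem.Str.lower (PySem.Str.strip k)
      let value := PySem.Str.strip v
      (match pvFieldNames.get? key with
       | some f => pkg.insert f value
       | none =>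
         if key == "installed-size" then
           match PySem.Int.ofStr? value with
           | some n => pkg.insert "installed_size" (PySem.Int.toStr (n * 1024))
           | none => pkg.insert "installed_size" "0"
         else pkg)
    | _ => pkg            -- unreachable: ": " ∈ line gives at least two pieces

-- _fields: build one package record from its header name and body lines
def pvFields (name : String) (body : List String) : PySem.Dict String String :=
  let pkg := PySem.Dict.ofList [("name", name)]
  if name == "" then pkg else body.foldl pvFieldStep pkg

-- _segments: split a block at "Package: " headers into (name, body) pairs
def pvSegmentsGo (nameOpt : Option String) (body : List String) :
    List String → List (String × List String)
  | [] => (match nameOpt with | none => [] | some n => [(n, body)])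
  | l :: ls =>
    if PySem.Str.startswith l "Package: " = true then
      (match nameOpt with | none => [] | some n => [(n, body)]) ++
        pvSegmentsGo (some (PySem.Str.strip (PySem.Str.slice l (some 9) none))) [] ls
    else
      match nameOpt with
      | none => pvSegmentsGo none body ls
      | some n => pvSegmentsGo (some n) (body ++ [l]) ls

-- _iter_blocks: group maximal runs of non-blank lines, carrying the pending block
def pvIterBlocks (block : List String) : List String → List (List String)
  | [] => if block = [] then [] else [block]
  | l :: ls =>
    if (PySem.Str.strip l == "") = false then pvIterBlocks (block ++ [l]) ls
    else if block = [] then pvIterBlocks [] ls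
    else block :: pvIterBlocks [] ls

def parse_package_info_py_alt (data : String) : List (String × List (String × String)) :=
  ((pvIterBlocks [] (PySem.Str.splitlines data)).foldl
      (fun pkgs blk =>
        (pvSegmentsGo none [] blk).foldl
          (fun pkgs s => pkgs.insert s.1 (pvFields s.1 s.2)) pkgs)
      PySem.Dict.empty).items.map (fun p => (p.1, p.2.items))

-- ===== PRECONDITION & SPEC =====
def Spec_parse_package_info_py (data : String) (out : List (String × List (String × String))) : Prop :=
  out = parse_package_info_py_alt data
instance (data : String) (out : List (String × List (String × String))) :
    Decidable (Spec_parse_package_info_py data out) := by unfold Spec_parse_package_info_py; infer_instance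

-- ===== CLAIM (what is proved, stated in full; the proofs are below) =====
def Claim_equal_parse_package_info_py : Prop := ∀ (data : String), Dom_parse_package_info_py data → Spec_parse_package_info_py data (parse_package_info_py data)

-- ===== LEMMAS AND PROOFS =====

-- B's per-segment insertion, named for the proofs
def pvInsSeg (pkgs : PySem.Dict String (PySem.Dict String String)) (s : String × List String) :
    PySem.Dict String (PySem.Dict String String) := pkgs.insert s.1 (pvFields s.1 s.2)

theorem pvModify_insert {κ ν : Type} [BEq κ] [LawfulBEq κ] (d : PySem.Dict κ ν) (k : κ) (v d0 : ν)
    (f : ν → ν) : (d.insert k v).modify k d0 f = d.insert k (f v) := by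
  simp [PySem.Dict.modify, PySem.Dict.getD_insert_self, PySem.Dict.insert_insert_self]

-- A's field write on a dict whose key cur was just inserted is B's local-dict write, re-inserted
theorem pvSet_eq (d : PySem.Dict String (PySem.Dict String String)) (cur key value : String)
    (pkg : PySem.Dict String String) :
    pvSetFieldA (d.insert cur pkg) cur key value
    = d.insert cur
        (match pvFieldNames.get? key with
         | some f => pkg.insert f value
         | none =>
           if key == "installed-size" then
             match PySem.Int.ofStr? value with
             | some n => pkg.insert "installed_size" (PySem.Int.toStr (n * 1024))
             | none => pkg.insert "installed_size" "0"
           else pkg) := by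
  unfold pvSetFieldA pvFieldNames
  simp only [PySem.Dict.get?_mk_cons]
  by_cases h1 : key = "version"
  · simp [h1, pvModify_insert]
  by_cases h2 : key = "architecture"
  · simp [h2, pvModify_insert]
  by_cases h3 : key = "description"
  · simp [h3, pvModify_insert]
  by_cases h4 : key = "installed-size"
  · subst h4
    cases PySem.Int.ofStr? value <;> simp [pvModify_insert, PySem.Dict.get?]
  · simp [h1, h2, h3, h4, Ne.symm h1, Ne.symm h2, Ne.symm h3]
    rfl

-- building the "version"-only record at a header, on both sides
theorem pvFields_nil (n : String) : pvFields n [] = PySem.Dict.ofList [("name", n)] := by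
  unfold pvFields; split <;> rfl

theorem pvFields_empty_name (body : List String) :
    pvFields "" body = PySem.Dict.ofList [("name", "")] := by
  unfold pvFields; rfl

-- segment lemma: within a run of non-blank lines, A's stateful fold from an open package equals
-- B's deferred per-segment record building
theorem pvSeg (rest : List String) (pkgs : PySem.Dict String (PySem.Dict String String))
    (cur : String) (body : List String)
    (hb : ∀ x ∈ rest, ¬ PySem.Str.strip x = "") :
    (rest.foldl pvStepA (pkgs.insert cur (pvFields cur body), some cur)).1
    = (pvSegmentsGo (some cur) body rest).foldl pvInsSeg pkgs := by
  induction rest generalizing pkgs cur body with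
  | nil => simp [pvSegmentsGo, pvInsSeg]
  | cons l rest ih =>
    have hl : ¬ PySem.Str.strip l = "" := hb l (by simp)
    have hrest : ∀ x ∈ rest, ¬ PySem.Str.strip x = "" := fun x hx => hb x (by simp [hx])
    simp only [List.foldl_cons, pvStepA, if_neg hl, pvSegmentsGo]
    by_cases hp : PySem.Str.startswith l "Package: " = true
    · simp only [if_pos hp, List.foldl_append, List.foldl_cons, List.foldl_nil, pvInsSeg]
      rw [← pvFields_nil]
      exact ih _ _ _ hrest
    · simp only [if_neg hp]
      by_cases hc : cur = ""
      · subst hc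
        simp only [beq_self_eq_true, Bool.not_true, Bool.false_and,
          Bool.false_eq_true, if_false]
        rw [show (pkgs.insert "" (pvFields "" body), some "")
              = (pkgs.insert "" (pvFields "" (body ++ [l])), some "") by
            rw [pvFields_empty_name, pvFields_empty_name]]
        exact ih _ _ _ hrest
      · have hfb : pvFields cur (body ++ [l]) = pvFieldStep (pvFields cur body) l := by
          unfold pvFields
          simp [hc, List.foldl_append]
        by_cases hin : PySem.Str.isIn ": " l = true
        · have hcond : (!(cur == "") && PySem.Str.isIn ": " l) = true := by
            simp only [hin]; simp [hc]
          simp only [if_pos hcond]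
          cases hs : PySem.Str.splitMax? l ": " 1 with
          | none =>
            rw [show pvFields cur body = pvFields cur (body ++ [l]) by
              rw [hfb]; unfold pvFieldStep; simp only [hin, hs]; simp]
            exact ih _ _ _ hrest
          | some parts =>
            match parts with
            | [] =>
              rw [show pvFields cur body = pvFields cur (body ++ [l]) by
                rw [hfb]; unfold pvFieldStep; simp only [hin, hs]; simp]
              exact ih _ _ _ hrest
            | [k] =>
              rw [show pvFields cur body = pvFields cur (body ++ [l]) by
                rw [hfb]; unfold pvFieldStep; simp only [hin, hs]; simp]
              exact ih _ _ _ hrest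
            | k :: v :: t =>
              show (List.foldl pvStepA
                  (pvSetFieldA (pkgs.insert cur (pvFields cur body)) cur
                    (PySem.Str.lower (PySem.Str.strip k)) (PySem.Str.strip v), some cur) rest).1
                = List.foldl pvInsSeg pkgs (pvSegmentsGo (some cur) (body ++ [l]) rest)
              rw [pvSet_eq]
              rw [show (match pvFieldNames.get? (PySem.Str.lower (PySem.Str.strip k)) with
                   | some f => (pvFields cur body).insert f (PySem.Str.strip v)
                   | none =>
                     if PySem.Str.lower (PySem.Str.strip k) == "installed-size" then
                       match PySem.Int.ofStr? (PySem.Str.strip v) with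
                       | some n => (pvFields cur body).insert "installed_size" (PySem.Int.toStr (n * 1024))
                       | none => (pvFields cur body).insert "installed_size" "0"
                     else pvFields cur body)
                  = pvFields cur (body ++ [l]) by
                rw [hfb]; unfold pvFieldStep; simp only [hin, hs]; simp]
              exact ih _ _ _ hrest
        · have hin' : PySem.Str.isIn ": " l = false := by
            revert hin; cases PySem.Str.isIn ": " l <;> simp
          have hcond : ¬ (!(cur == "") && PySem.Str.isIn ": " l) = true := by
            simp only [hin']; simp
          simp only [if_neg hcond]
          rw [show pvFields cur body = pvFields cur (body ++ [l]) by
            rw [hfb]; unfold pvFieldStep; simp only [hin']; simp]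
          exact ih _ _ _ hrest

-- prefix lemma: before the first header of a block both sides drop lines
theorem pvBlock (blk : List String) (pkgs : PySem.Dict String (PySem.Dict String String))
    (body : List String) (hb : ∀ x ∈ blk, ¬ PySem.Str.strip x = "") :
    (blk.foldl pvStepA (pkgs, none)).1 = (pvSegmentsGo none body blk).foldl pvInsSeg pkgs := by
  induction blk generalizing body with
  | nil => rfl
  | cons l rest ih =>
    have hl : ¬ PySem.Str.strip l = "" := hb l (by simp)
    have hrest : ∀ x ∈ rest, ¬ PySem.Str.strip x = "" := fun x hx => hb x (by simp [hx])
    simp only [List.foldl_cons, pvStepA, if_neg hl, pvSegmentsGo]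
    by_cases hp : PySem.Str.startswith l "Package: " = true
    · simp only [if_pos hp, List.nil_append]
      rw [← pvFields_nil]
      exact pvSeg _ _ _ _ hrest
    · simp only [if_neg hp]
      exact ih body hrest

-- main lemma: A's single pass, started after the pending non-blank run `block`, equals
-- B's group-into-blocks pass with `block` still pending
theorem pvMain (lines : List String) (block : List String)
    (pkgs : PySem.Dict String (PySem.Dict String String))
    (hb : ∀ x ∈ block, ¬ PySem.Str.strip x = "") :
    (lines.foldl pvStepA (block.foldl pvStepA (pkgs, none))).1
    = (pvIterBlocks block lines).foldl
        (fun pkgs blk => (pvSegmentsGo none [] blk).foldl pvInsSeg pkgs) pkgs := by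
  induction lines generalizing block pkgs with
  | nil =>
    simp only [List.foldl_nil, pvIterBlocks]
    by_cases h : block = []
    · simp [h]
    · simp only [if_neg h, List.foldl_cons, List.foldl_nil]
      exact pvBlock _ _ _ hb
  | cons l ls ih =>
    by_cases hl : PySem.Str.strip l = ""
    · have hstep : ∀ s : PySem.Dict String (PySem.Dict String String) × Option String,
          pvStepA s l = (s.1, none) := by intro s; simp [pvStepA, hl]
      have h1 : (l :: ls).foldl pvStepA (block.foldl pvStepA (pkgs, none))
          = ls.foldl pvStepA ((block.foldl pvStepA (pkgs, none)).1, none) := by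
        rw [List.foldl_cons, hstep]
      rw [h1]
      simp only [pvIterBlocks, show (PySem.Str.strip l == "") = true by simp [hl],
        Bool.true_eq_false, if_false]
      by_cases h : block = []
      · subst h
        simpa using ih [] pkgs (by simp)
      · simp only [if_neg h, List.foldl_cons]
        have := ih [] ((block.foldl pvStepA (pkgs, none)).1) (by simp)
        simp only [List.foldl_nil] at this
        rw [this, pvBlock _ _ [] hb]
    · have h1 : (l :: ls).foldl pvStepA (block.foldl pvStepA (pkgs, none))
          = ls.foldl pvStepA ((block ++ [l]).foldl pvStepA (pkgs, none)) := by
        simp [List.foldl_append]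
      rw [h1]
      simp only [pvIterBlocks, show (PySem.Str.strip l == "") = false by simp [hl], if_true]
      exact ih (block ++ [l]) pkgs (by
        intro x hx
        rcases List.mem_append.mp hx with h | h
        · exact hb x h
        · simp at h; subst h; exact hl)

-- ===== VERDICT (by name: the statement is the Claim_ definition above) =====
theorem parse_package_info_py_spec : Claim_equal_parse_package_info_py := by
  intro data _
  unfold Spec_parse_package_info_py parse_package_info_py parse_package_info_py_alt
  have := pvMain (PySem.Str.splitlines data) [] PySem.Dict.empty (by simp)
  simp only [List.foldl_nil] at this
  rw [this]
  rfl
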